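-- pv_equiv track=rewrite | github.com/2549239/2549239-Python-Assignment | oge.py | choose_best_abbreviations
-- ===== SOURCE A (Python) =====
-- def choose_best_abbreviations(abbreviations): # Selecting the best abbreviations#
--     best_abbreviations = {}
--     for abbreviation, score in abbreviations:
--         if abbreviation not in best_abbreviations:
--             best_abbreviations[abbreviation] = score
--         else:
--             best_abbreviations[abbreviation] = min(score, best_abbreviations[abbreviation])
--
--     return best_abbreviations
-- ===== SOURCE B (Python) =====
-- def choose_best_abbreviations(abbreviations):
--     # Two passes: group all scores per abbreviation, then reduce each group with min.
--     groups = {}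
--     for abbreviation, score in abbreviations:
--         groups.setdefault(abbreviation, []).append(score)
--     return {k: min(v) for k, v in groups.items()}
-- ===== Notes on version B (the rewrite author's own statement) =====
-- stated objective: alternative
-- what changed: Replaces A's inline running-min update inside one dict loop by a collect-then-reduce decomposition: a first pass groups every score under its abbreviation, and a separate second pass takes min of each group.
import Mathlib
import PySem

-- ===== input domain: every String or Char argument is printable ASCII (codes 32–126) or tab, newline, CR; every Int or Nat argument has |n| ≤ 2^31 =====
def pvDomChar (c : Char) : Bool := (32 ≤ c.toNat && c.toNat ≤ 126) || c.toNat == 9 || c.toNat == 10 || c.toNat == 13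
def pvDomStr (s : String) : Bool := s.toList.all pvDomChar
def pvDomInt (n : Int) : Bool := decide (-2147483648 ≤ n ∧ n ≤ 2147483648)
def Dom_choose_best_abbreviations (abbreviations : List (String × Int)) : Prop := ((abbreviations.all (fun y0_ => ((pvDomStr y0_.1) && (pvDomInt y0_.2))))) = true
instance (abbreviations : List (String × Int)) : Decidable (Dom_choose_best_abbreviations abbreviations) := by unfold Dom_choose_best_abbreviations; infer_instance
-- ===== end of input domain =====

-- B groups all scores per abbreviation, then reduces each group with min (alternative decomposition, same cost).

-- ===== PORT A =====
-- one dict loop keeping a running minimum per key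
def choose_best_abbreviations (abbreviations : List (String × Int)) : List (String × Int) :=
  (abbreviations.foldl
    (fun (d : PySem.Dict String Int) p =>
      match d.get? p.1 with
      | none => d.insert p.1 p.2                      -- abbreviation not in best_abbreviations
      | some v => d.insert p.1 (min p.2 v))           -- best[a] = min(score, best[a])
    PySem.Dict.empty).items

-- ===== PORT B =====
-- min(v) on the (always nonempty) group; [] case is unreachable, 0 is a placeholder
def pyMinList (l : List Int) : Int :=
  match l with
  | [] => 0
  | h :: t => t.foldl min h

def choose_best_abbreviations_alt (abbreviations : List (String × Int)) : List (String × Int) :=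
  let groups := abbreviations.foldl
    (fun (d : PySem.Dict String (List Int)) p => d.modify p.1 [] (· ++ [p.2]))
    PySem.Dict.empty
  groups.items.map (fun p => (p.1, pyMinList p.2))

-- ===== PRECONDITION & SPEC =====
def Spec_choose_best_abbreviations (abbreviations : List (String × Int)) (out : List (String × Int)) : Prop := out = choose_best_abbreviations_alt abbreviations
instance (abbreviations : List (String × Int)) (out : List (String × Int)) : Decidable (Spec_choose_best_abbreviations abbreviations out) := by unfold Spec_choose_best_abbreviations; infer_instance

-- ===== CLAIM (what is proved, stated in full; the proofs are below) =====
def Claim_equal_choose_best_abbreviations : Prop := ∀ (abbreviations : List (String × Int)), Dom_choose_best_abbreviations abbreviations → Spec_choose_best_abbreviations abbreviations (choose_best_abbreviations abbreviations)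

-- ===== LEMMAS AND PROOFS =====

-- abbreviations for the two loop bodies
def stepA (d : PySem.Dict String Int) (p : String × Int) : PySem.Dict String Int :=
  match d.get? p.1 with
  | none => d.insert p.1 p.2
  | some v => d.insert p.1 (min p.2 v)

def stepB (d : PySem.Dict String (List Int)) (p : String × Int) : PySem.Dict String (List Int) :=
  d.modify p.1 [] (· ++ [p.2])

-- running minimum over an optional accumulator
def runMin (o : Option Int) (s : List Int) : Option Int :=
  s.foldl (fun o v => some (match o with | none => v | some w => min v w)) o

lemma stepA_eq_insert (d : PySem.Dict String Int) (p : String × Int) :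
    stepA d p = d.insert p.1 (match d.get? p.1 with | none => p.2 | some v => min p.2 v) := by
  unfold stepA
  cases d.get? p.1 <;> rfl

lemma keysA_nodup (l : List (String × Int)) (d : PySem.Dict String Int) (h : d.keys.Nodup) :
    (l.foldl stepA d).keys.Nodup := by
  have : l.foldl stepA d =
      l.foldl (fun d p => d.insert p.1 ((fun (d : PySem.Dict String Int) (p : String × Int) =>
        match d.get? p.1 with | none => p.2 | some v => min p.2 v) d p)) d := by
    exact PySem.List.foldl_congr_mem l _ _ d (fun d' p _ => stepA_eq_insert d' p)
  rw [this]
  exact PySem.Dict.nodup_keys_foldl_insert_key l Prod.fst _ d h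

lemma keysA (l : List (String × Int)) (d : PySem.Dict String Int) :
    (l.foldl stepA d).keys = PySem.Set.update d.keys (l.map Prod.fst) := by
  have : l.foldl stepA d =
      l.foldl (fun d p => d.insert p.1 ((fun (d : PySem.Dict String Int) (p : String × Int) =>
        match d.get? p.1 with | none => p.2 | some v => min p.2 v) d p)) d := by
    exact PySem.List.foldl_congr_mem l _ _ d (fun d' p _ => stepA_eq_insert d' p)
  rw [this]
  exact PySem.Dict.keys_foldl_insert_key l Prod.fst _ d

lemma get?_foldA (l : List (String × Int)) (d : PySem.Dict String Int) (c : String) :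
    (l.foldl stepA d).get? c = runMin (d.get? c) ((l.filter (fun p => p.1 == c)).map Prod.snd) := by
  induction l generalizing d with
  | nil => rfl
  | cons p l ih =>
    simp only [List.foldl_cons, ih, List.filter_cons]
    by_cases hc : p.1 = c
    · subst hc
      simp only [beq_self_eq_true, if_pos, List.map_cons]
      have hstep : (stepA d p).get? p.1 =
          some (match d.get? p.1 with | none => p.2 | some v => min p.2 v) := by
        rw [stepA_eq_insert]; exact PySem.Dict.get?_insert_self _ _ _
      rw [hstep]
      unfold runMin
      simp only [List.foldl_cons]
    · have hb : (p.1 == c) = false := by simpa using hc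
      simp only [hb, Bool.false_eq_true, if_neg, not_false_iff]
      have hstep : (stepA d p).get? c = d.get? c := by
        rw [stepA_eq_insert]
        exact PySem.Dict.get?_insert_of_ne _ _ (fun h => hc h.symm)
      rw [hstep]

-- on a nonempty list, the running minimum is pyMinList
lemma runMin_some (h : Int) (t : List Int) :
    runMin none (h :: t) = some (pyMinList (h :: t)) := by
  unfold runMin pyMinList
  simp only [List.foldl_cons]
  induction t generalizing h with
  | nil => rfl
  | cons x t ih =>
    simp only [List.foldl_cons]
    have := ih (min x h)
    rw [this, min_comm x h]

-- ===== VERDICT (by name: the statement is the Claim_ definition above) =====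
theorem choose_best_abbreviations_spec : Claim_equal_choose_best_abbreviations := by
  intro l _
  show choose_best_abbreviations l = choose_best_abbreviations_alt l
  show (l.foldl stepA PySem.Dict.empty).items =
    (l.foldl stepB PySem.Dict.empty).items.map (fun p => (p.1, pyMinList p.2))
  set dA := l.foldl stepA PySem.Dict.empty with hdA
  set dB := l.foldl stepB PySem.Dict.empty with hdB
  have hBfold : dB = l.foldl (fun (d : PySem.Dict String (List Int)) x =>
      d.modify (Prod.fst x) [] ((fun (_ : PySem.Dict String (List Int)) (p : String × Int) (v : List Int) => v ++ [p.2]) d x)) PySem.Dict.empty := rfl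
  have hndA : dA.keys.Nodup := keysA_nodup l _ (by simp [PySem.Dict.keys_empty])
  have hndB : dB.keys.Nodup := by
    rw [hBfold]
    exact PySem.Dict.nodup_keys_foldl_modify_key l Prod.fst [] _ PySem.Dict.empty
      (by simp [PySem.Dict.keys_empty])
  have hkeysB : dB.keys = PySem.Set.update (PySem.Dict.empty : PySem.Dict String (List Int)).keys (l.map Prod.fst) := by
    rw [hBfold]
    exact PySem.Dict.keys_foldl_modify_key l Prod.fst [] _ PySem.Dict.empty
  have hkeys : dA.keys = dB.keys := by
    rw [hdA, keysA, hkeysB]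
    simp [PySem.Dict.keys_empty]
  rw [PySem.Dict.items_eq_map_keys dA hndA 0,
      PySem.Dict.items_eq_map_keys dB hndB [],
      List.map_map, hkeys]
  apply List.map_congr_left
  intro k hk
  simp only [Function.comp]
  congr 1
  -- value at key k
  have hgB : dB.getD k [] = (l.filter (fun p => p.1 == k)).map (fun x => x.2) := by
    rw [hdB]
    have := PySem.Dict.getD_foldl_modify_append l PySem.Dict.empty k
    simpa [PySem.Dict.getD_empty] using this
  have hmem : ∃ p ∈ l, p.1 = k := by
    rw [hkeysB] at hk
    simp only [PySem.Dict.keys_empty, PySem.Set.update_nil_left, PySem.Set.mem_ofList,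
      List.mem_map] at hk
    obtain ⟨p, hp, hpe⟩ := hk
    exact ⟨p, hp, hpe⟩
  have hne : (l.filter (fun p => p.1 == k)).map (fun x => x.2) ≠ [] := by
    obtain ⟨p, hp, hpe⟩ := hmem
    simp only [ne_eq, List.map_eq_nil_iff, List.filter_eq_nil_iff]
    intro h
    exact h p hp (by simp [hpe])
  obtain ⟨h, t, hht⟩ : ∃ h t, (l.filter (fun p => p.1 == k)).map (fun x => x.2) = h :: t := by
    cases hpf : (l.filter (fun p => p.1 == k)).map (fun x => x.2) with
    | nil => exact absurd hpf hne
    | cons h t => exact ⟨h, t, rfl⟩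
  have hgA : dA.get? k = some (pyMinList (h :: t)) := by
    rw [hdA, get?_foldA, PySem.Dict.get?_empty]
    have : List.map Prod.snd (l.filter (fun p => p.1 == k)) = h :: t := hht
    rw [this, runMin_some]
  rw [PySem.Dict.getD_eq_get?_getD, hgA, hgB, hht]
  rfl
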